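-- pv_equiv track=rewrite | github.com/c-stap/gpxtractor | gpxtractor/area_graphs.py | braille_char
-- ===== SOURCE A (Python) =====
-- EMPTY_BRAILLE_CHAR = 0x2800
--
-- def braille_char(left: int, right: int) -> str:
--     left = min(left, 4)
--     right = min(right, 4)
--
--     left = 0 if left < 0 else left
--     right = 0 if right < 0 else right
--
--     left_dots = [0] * (4 - left) + [1] * left
--     right_dots = [0] * (4 - right) + [1] * right
--
--     # Unicode position left (top to bottom) 1, 2, 3, 7
--     # Unicode position right (top to bottom) 4, 5, 6, 8
--     dot_positions = [0, 1, 2, 6, 3, 4, 5, 7]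
--     dots = [0] * 8
--     for dot, position in zip(left_dots + right_dots, dot_positions):
--         dots[position] = dot
--
--     bit_diff = sum((1 << i) for i, d in enumerate(dots) if d)
--
--     return chr(EMPTY_BRAILLE_CHAR + bit_diff)
-- ===== SOURCE B (Python) =====
-- LEFT_MASKS = [0x00, 0x40, 0x44, 0x46, 0x47]
-- RIGHT_MASKS = [0x00, 0x80, 0xA0, 0xB0, 0xB8]
--
-- def braille_char(left: int, right: int) -> str:
--     l = min(left, 4)
--     r = min(right, 4)
--     l = 0 if l < 0 else l
--     r = 0 if r < 0 else r
--     return chr(0x2800 + (LEFT_MASKS[l] | RIGHT_MASKS[r]))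
-- ===== Notes on version B (the rewrite author's own statement) =====
-- stated objective: simpler
-- what changed: Replaces the dot-array construction, position-permutation loop and enumerate-sum with two precomputed 5-entry bitmask tables indexed by the clamped heights and a single bitwise OR.
import Mathlib
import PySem

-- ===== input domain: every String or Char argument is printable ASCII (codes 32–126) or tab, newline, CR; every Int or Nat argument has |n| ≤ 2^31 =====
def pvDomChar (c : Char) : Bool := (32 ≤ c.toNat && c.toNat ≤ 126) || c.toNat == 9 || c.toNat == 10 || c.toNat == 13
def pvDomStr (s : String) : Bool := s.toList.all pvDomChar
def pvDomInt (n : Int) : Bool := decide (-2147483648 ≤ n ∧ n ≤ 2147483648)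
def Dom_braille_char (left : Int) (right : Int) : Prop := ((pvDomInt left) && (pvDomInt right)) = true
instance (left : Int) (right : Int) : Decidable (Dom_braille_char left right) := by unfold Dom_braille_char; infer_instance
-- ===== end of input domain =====

-- B replaces A's dot-array building and position-permutation loop with two 5-entry
-- bitmask tables and a single bitwise OR (objective: simpler).

-- ===== PORT A =====
-- the body of A after the two clamps (lists, permutation loop, bit sum)
def brailleCoreA (left : Int) (right : Int) : String :=
  let left_dots : List Int := List.replicate (4 - left).toNat 0 ++ List.replicate left.toNat 1
  let right_dots : List Int := List.replicate (4 - right).toNat 0 ++ List.replicate right.toNat 1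
  let dot_positions : List Nat := [0, 1, 2, 6, 3, 4, 5, 7]
  let dots : List Int :=
    (List.zip (left_dots ++ right_dots) dot_positions).foldl
      (fun (ds : List Int) (p : Int × Nat) => ds.set p.2 p.1) (List.replicate 8 0)
  let bit_diff : Int :=
    ((PySem.List.enumerate dots).filter (fun p => p.2 != 0)).foldl (fun s p => s + ((2 : Int) ^ p.1.toNat)) 0
  String.mk [Char.ofNat (0x2800 + bit_diff).toNat]

def braille_char (left : Int) (right : Int) : String :=
  let left := min left 4
  let right := min right 4
  let left := if left < 0 then 0 else left
  let right := if right < 0 then 0 else right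
  brailleCoreA left right

-- ===== PORT B =====
def leftMasks : List Nat := [0x00, 0x40, 0x44, 0x46, 0x47]
def rightMasks : List Nat := [0x00, 0x80, 0xA0, 0xB0, 0xB8]

def braille_char_alt (left : Int) (right : Int) : String :=
  let l := min left 4
  let r := min right 4
  let l := if l < 0 then 0 else l
  let r := if r < 0 then 0 else r
  String.mk [Char.ofNat (0x2800 + (leftMasks.getD l.toNat 0 ||| rightMasks.getD r.toNat 0))]

-- ===== PRECONDITION & SPEC =====
def Spec_braille_char (left : Int) (right : Int) (out : String) : Prop := out = braille_char_alt left right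
instance (left : Int) (right : Int) (out : String) : Decidable (Spec_braille_char left right out) := by unfold Spec_braille_char; infer_instance

-- ===== CLAIM (what is proved, stated in full; the proofs are below) =====
def Claim_equal_braille_char : Prop := ∀ (left : Int) (right : Int), Dom_braille_char left right → Spec_braille_char left right (braille_char left right)

-- ===== LEMMAS AND PROOFS =====

-- on the 25 clamped height pairs the two computations agree (checked by evaluation)
theorem core_eq (a b : Int) (ha : 0 ≤ a) (ha4 : a ≤ 4) (hb : 0 ≤ b) (hb4 : b ≤ 4) :
    brailleCoreA a b =
      String.mk [Char.ofNat (0x2800 + (leftMasks.getD a.toNat 0 ||| rightMasks.getD b.toNat 0))] := by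
  interval_cases a <;> interval_cases b <;> rfl

-- ===== VERDICT (by name: the statement is the Claim_ definition above) =====
theorem braille_char_spec : Claim_equal_braille_char := by
  intro left right _
  unfold Spec_braille_char braille_char braille_char_alt
  apply core_eq <;> (split <;> omega)
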